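-- pv_equiv track=rewrite | github.com/supercasao/selfishmining | dados/teste.py | comparar_analises
-- ===== SOURCE A (Python) =====
-- def comparar_analises(originais, permutados):
--     """Compara a análise original com as análises permutadas."""
--     mineradores = originais.keys()
--     num_permutacoes = len(permutados)
--     resultados = {minerador: 0 for minerador in mineradores}
--
--     for minerador in mineradores:
--         original_count = originais[minerador]
--         permutado_counts = [permutado[minerador] for permutado in permutados]
--         resultados[minerador] = sum(1 for count in permutado_counts if original_count > count)
--
--     return resultados
-- ===== SOURCE B (Python) =====
-- def comparar_analises(originais, permutados):
--     """Compara a análise original com as análises permutadas."""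
--     resultados = {}
--     for minerador, original in originais.items():
--         # sort the permuted values; those below the original form a prefix,
--         # whose length is found by binary search (bisect_left)
--         ordenados = sorted(permutado[minerador] for permutado in permutados)
--         lo, hi = 0, len(ordenados)
--         while lo < hi:
--             mid = (lo + hi) // 2
--             if ordenados[mid] < original:
--                 lo = mid + 1
--             else:
--                 hi = mid
--         resultados[minerador] = lo
--     return resultados
-- ===== Notes on version B (the rewrite author's own statement) =====
-- stated objective: alternative
-- what changed: Per miner, B sorts the permuted values and locates the original by a hand-written binary search (bisect_left), returning the length of the prefix of smaller values, instead of A's linear conditional count over a materialised list.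
-- outside the precondition, e.g. on comparar_analises({'a': 1}, [{}]): A raises KeyError, B raises KeyError
import Mathlib
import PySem

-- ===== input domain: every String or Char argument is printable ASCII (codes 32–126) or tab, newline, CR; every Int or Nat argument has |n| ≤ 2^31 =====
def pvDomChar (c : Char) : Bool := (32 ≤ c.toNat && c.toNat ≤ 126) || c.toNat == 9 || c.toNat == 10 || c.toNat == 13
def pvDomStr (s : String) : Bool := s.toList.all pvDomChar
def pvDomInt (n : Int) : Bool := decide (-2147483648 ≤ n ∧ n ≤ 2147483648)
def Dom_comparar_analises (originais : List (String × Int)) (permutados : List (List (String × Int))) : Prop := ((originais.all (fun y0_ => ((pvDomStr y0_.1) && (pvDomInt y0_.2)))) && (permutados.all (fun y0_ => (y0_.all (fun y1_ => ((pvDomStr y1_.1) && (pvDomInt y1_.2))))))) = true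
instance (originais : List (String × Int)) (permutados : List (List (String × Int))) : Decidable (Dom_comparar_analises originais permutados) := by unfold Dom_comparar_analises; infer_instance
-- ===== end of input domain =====

-- B replaces A's linear conditional count per miner by sort + hand-written binary search
-- (bisect_left): the permuted values below the original form a prefix of the sorted list
-- (objective: alternative algorithm).  Dicts are modelled as PySem.Dict.

-- ===== PORT A =====
-- A, step for step: mineradores = keys; resultados = {m: 0}; for each m, build the list of
-- permutado[m] and sum the indicator.  permutado[minerador] raises KeyError when the key is
-- missing; such inputs are excluded by Pre_ below, so getD's default 0 is never reached there.
def comparar_analises (originais : List (String × Int)) (permutados : List (List (String × Int))) : List (String × Int) :=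
  let og := PySem.Dict.ofList originais
  let perms := permutados.map PySem.Dict.ofList
  let mineradores := og.keys
  let resultados := mineradores.foldl (fun d m => d.insert m (0 : Int)) PySem.Dict.empty
  let resultados := mineradores.foldl (fun d m =>
    let original_count := og.getD m 0
    let permutado_counts := perms.map (fun p => p.getD m 0)
    d.insert m (permutado_counts.foldl (fun acc c => if original_count > c then acc + 1 else acc) (0 : Int))) resultados
  resultados.items

-- ===== PORT B =====
-- B's while-loop (bisect_left) as the obvious structural recursion on hi - lo.
-- ordenados[mid] has 0 ≤ lo ≤ mid < hi ≤ len, so the index is in range and getD's default 0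
-- is never reached; (lo+hi)//2 on the Nats 0 ≤ lo,hi is Nat division, exact for Python's //.
def bisGo (a : List Int) (x : Int) (lo hi : Nat) : Nat :=
  if lo < hi then
    let mid := (lo + hi) / 2
    if a.getD mid 0 < x then bisGo a x (mid + 1) hi else bisGo a x lo mid
  else lo
termination_by hi - lo
decreasing_by all_goals omega

-- B, step for step: for (minerador, original) in originais.items(): ordenados = sorted(gen);
-- lo = bisect_left loop; resultados[minerador] = lo.  Same KeyError inputs as A (Pre_ below).
def comparar_analises_alt (originais : List (String × Int)) (permutados : List (List (String × Int))) : List (String × Int) :=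
  let og := PySem.Dict.ofList originais
  let resultados := og.items.foldl (fun d mp =>
    let ordenados := PySem.List.sorted (permutados.map (fun p => (PySem.Dict.ofList p).getD mp.1 0)) (fun y => y) false
    d.insert mp.1 ((bisGo ordenados mp.2 0 ordenados.length : Nat) : Int)) PySem.Dict.empty
  resultados.items

-- ===== PRECONDITION & SPEC =====
-- Pre_ excludes exactly the inputs where Python raises KeyError (both A and B do): some miner of
-- originais missing from some permuted dict.
def Pre_comparar_analises (originais : List (String × Int)) (permutados : List (List (String × Int))) : Prop :=
  ∀ m ∈ (PySem.Dict.ofList originais).keys, ∀ p ∈ permutados, (PySem.Dict.ofList p).contains m = true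
instance (originais : List (String × Int)) (permutados : List (List (String × Int))) : Decidable (Pre_comparar_analises originais permutados) := by unfold Pre_comparar_analises; infer_instance

def pvWitness_comparar_analises : (List (String × Int)) × (List (List (String × Int))) :=
  ([("a", 2), ("b", 0)], [[("a", 1), ("b", 5)], [("b", 0), ("a", 3)]])

def Spec_comparar_analises (originais : List (String × Int)) (permutados : List (List (String × Int))) (out : List (String × Int)) : Prop := out = comparar_analises_alt originais permutados
instance (originais : List (String × Int)) (permutados : List (List (String × Int))) (out : List (String × Int)) : Decidable (Spec_comparar_analises originais permutados out) := by unfold Spec_comparar_analises; infer_instance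

-- ===== CLAIM =====
def Claim_equal_comparar_analises : Prop := ∀ (originais : List (String × Int)) (permutados : List (List (String × Int))), Dom_comparar_analises originais permutados → Pre_comparar_analises originais permutados → Spec_comparar_analises originais permutados (comparar_analises originais permutados)

-- ===== LEMMAS AND PROOFS =====

-- fold of inserts whose value depends only on the key, over a Nodup key list
theorem getD_foldl_insert_fun {κ : Type} [DecidableEq κ] [BEq κ] [LawfulBEq κ]
    (l : List κ) (g : κ → Int) (d : PySem.Dict κ Int) (x : κ) (hnd : l.Nodup) :
    (l.foldl (fun d m => d.insert m (g m)) d).getD x 0 =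
      if x ∈ l then g x else d.getD x 0 := by
  induction l generalizing d with
  | nil => simp
  | cons a t ih =>
    have hnd' := hnd
    simp only [List.nodup_cons] at hnd'
    simp only [List.foldl_cons, ih _ hnd'.2, List.mem_cons]
    rw [show ∀ y : κ, (d.insert a (g a)).getD y 0 = if y = a then g a else d.getD y 0 from fun y => PySem.Dict.getD_insert _ _ _ _ _]
    by_cases hx : x = a
    · subst hx; simp [hnd'.1]
    · simp [hx]

-- monotone access into a Pairwise-(≤) list
theorem getD_mono_of_pairwise (a : List Int) (hp : a.Pairwise (· ≤ ·))
    (i j : Nat) (hij : i ≤ j) (hj : j < a.length) :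
    a.getD i 0 ≤ a.getD j 0 := by
  rcases Nat.lt_or_ge i j with h | h
  · have := (List.pairwise_iff_getElem.mp hp) i j (by omega) hj h
    simpa [List.getD_eq_getElem?_getD, List.getElem?_eq_getElem, hj, show i < a.length by omega] using this
  · have : i = j := by omega
    subst this; rfl

-- the binary search returns the number of elements below x in a sorted list
theorem bisGo_eq_countP (a : List Int) (x : Int) (hp : a.Pairwise (· ≤ ·)) :
    ∀ lo hi, lo ≤ hi → hi ≤ a.length →
      (∀ i, i < lo → a.getD i 0 < x) →
      (∀ i, hi ≤ i → i < a.length → ¬ a.getD i 0 < x) →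
      bisGo a x lo hi = a.countP (fun y => decide (y < x)) := by
  intro lo hi
  induction hn : hi - lo using Nat.strong_induction_on generalizing lo hi with
  | _ n ih =>
  intro hlohi hhi hlow hhigh
  by_cases h : lo < hi
  · rw [bisGo]
    simp only [h, if_true]
    set mid := (lo + hi) / 2 with hmid
    have hmlo : lo ≤ mid := by omega
    have hmhi : mid < hi := by omega
    by_cases hc : a.getD mid 0 < x
    · simp only [hc, if_true]
      exact ih (hi - (mid + 1)) (by omega) (mid + 1) hi rfl (by omega) hhi
        (fun i hilt => lt_of_le_of_lt (getD_mono_of_pairwise a hp i mid (by omega) (by omega)) hc)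
        hhigh
    · simp only [hc, if_false]
      exact ih (mid - lo) (by omega) lo mid rfl (by omega) (by omega) hlow
        (fun i hmi hil hlt => hc (lt_of_le_of_lt (getD_mono_of_pairwise a hp mid i hmi hil) hlt))
  · rw [bisGo]
    simp only [h, if_false]
    have hlo : lo = hi := by omega
    subst hlo
    -- every index < lo satisfies the predicate, every index ≥ lo does not: countP = lo
    have hsplit : a = a.take lo ++ a.drop lo := (List.take_append_drop lo a).symm
    rw [hsplit, List.countP_append]
    have h1 : (a.take lo).countP (fun y => decide (y < x)) = lo := by
      rw [List.countP_eq_length.mpr, List.length_take_of_le hhi]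
      intro y hy
      obtain ⟨i, hi', hyi⟩ := List.getElem_of_mem hy
      have hile : i < lo := by have := hi'; rw [List.length_take] at this; omega
      have hilen : i < a.length := by omega
      have hyd : y = a[i] := by rw [← hyi, List.getElem_take]
      have hlt := hlow i hile
      rw [List.getD_eq_getElem?_getD, List.getElem?_eq_getElem hilen] at hlt
      simpa [hyd] using hlt
    have h2 : (a.drop lo).countP (fun y => decide (y < x)) = 0 := by
      rw [List.countP_eq_zero]
      intro y hy
      obtain ⟨i, hi', hyi⟩ := List.getElem_of_mem hy
      have hilen : lo + i < a.length := by
        have := hi'; rw [List.length_drop] at this; omega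
      have hyd : y = a[lo + i] := by rw [← hyi, List.getElem_drop]
      have hge := hhigh (lo + i) (by omega) hilen
      rw [List.getD_eq_getElem?_getD, List.getElem?_eq_getElem hilen] at hge
      simpa [hyd] using hge
    omega

theorem comparar_analises_spec : Claim_equal_comparar_analises := by
  intro originais permutados _ _
  unfold Spec_comparar_analises comparar_analises comparar_analises_alt
  simp only []
  have hnd : (PySem.Dict.ofList originais).keys.Nodup := PySem.Dict.nodup_keys_ofList _
  set og := PySem.Dict.ofList originais with hog
  set K := og.keys with hKdef
  -- B's loop inserts the fresh distinct keys of og.items into an empty dict: items append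
  have hB : (og.items.foldl (fun d mp =>
      d.insert mp.1 (((bisGo (PySem.List.sorted (permutados.map (fun p => (PySem.Dict.ofList p).getD mp.1 0)) (fun y => y) false) mp.2 0
        (PySem.List.sorted (permutados.map (fun p => (PySem.Dict.ofList p).getD mp.1 0)) (fun y => y) false).length : Nat) : Int))) PySem.Dict.empty).items
      = og.items.map (fun mp => (mp.1, ((bisGo (PySem.List.sorted (permutados.map (fun p => (PySem.Dict.ofList p).getD mp.1 0)) (fun y => y) false) mp.2 0
        (PySem.List.sorted (permutados.map (fun p => (PySem.Dict.ofList p).getD mp.1 0)) (fun y => y) false).length : Nat) : Int))) := by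
    rw [PySem.Dict.items_foldl_insert_fresh _ _ _ _ (fun a _ => PySem.Dict.contains_empty _) hnd]
    simp [PySem.Dict.empty]
  rw [hB]
  -- A's result dict: keys and per-key values
  set init := K.foldl (fun d m => d.insert m (0 : Int)) PySem.Dict.empty with hinit
  have hinitkeys : init.keys = K := by
    rw [hinit, PySem.Dict.keys_foldl_insert, PySem.Dict.keys_empty, PySem.Set.update_nil_left]
    exact PySem.Set.ofList_eq_self_of_nodup _ hnd
  have hAkeys : (K.foldl (fun d m => d.insert m
      (((permutados.map PySem.Dict.ofList).map (fun p => p.getD m 0)).foldl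
        (fun acc c => if og.getD m 0 > c then acc + 1 else acc) (0 : Int))) init).keys = K := by
    rw [PySem.Dict.keys_foldl_insert, hinitkeys, PySem.Set.update_eq_append_filter]
    have : ((PySem.Set.ofList K).filter (fun y => !(PySem.Set.contains K y))) = [] := by
      rw [List.filter_eq_nil_iff]
      intro y hy
      simp [PySem.Set.contains_eq_listContains, (PySem.Set.mem_ofList _ _).1 hy]
    rw [this, List.append_nil]
  rw [PySem.Dict.items_eq_map_keys _ (by rw [hAkeys]; exact hnd) 0, hAkeys,
      PySem.Dict.items_eq_map_keys og hnd 0]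
  rw [List.map_map]
  refine List.map_congr_left (fun k hk => ?_)
  simp only [Function.comp]
  refine Prod.ext rfl ?_
  -- A's value at k
  rw [getD_foldl_insert_fun K _ init k hnd]
  simp only [hk, if_true]
  rw [PySem.List.foldl_ite_add_one, zero_add]
  -- B's value at k
  set M := permutados.map (fun p => (PySem.Dict.ofList p).getD k 0) with hM
  set S := PySem.List.sorted M (fun y => y) false with hS
  have hpair : S.Pairwise (· ≤ ·) := PySem.List.sorted_pairwise M (fun y => y)
  have hbis : bisGo S (og.getD k 0) 0 S.length = S.countP (fun y => decide (y < og.getD k 0)) :=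
    bisGo_eq_countP S (og.getD k 0) hpair 0 S.length (Nat.zero_le _) le_rfl
      (fun i hi => absurd hi (Nat.not_lt_zero i)) (fun i hge hlt => absurd (Nat.lt_of_lt_of_le hlt hge) (lt_irrefl i))
  rw [hbis]
  have hperm : S.Perm M := PySem.List.sorted_perm M (fun y => y) false
  rw [hperm.countP_eq]
  have hMeq : M = (permutados.map PySem.Dict.ofList).map (fun p => p.getD k 0) := by
    simp [hM, Function.comp]
  rw [hMeq]
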